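-- pv_equiv track=rewrite | github.com/hugodbrnn/web-datamining | src/ie/extract_race_results.py | clean_team
-- ===== SOURCE A (Python) =====
-- KNOWN_TEAMS = [
--     "Red Bull Racing", "Aston Martin", "Haas F1 Team", "Kick Sauber",
--     "Racing Bulls", "McLaren", "Mercedes", "Ferrari", "Alpine", "Williams",
--     "AlphaTauri", "Alpha Tauri", "Alfa Romeo", "Haas", "RB", "Sauber",
--     "Toro Rosso", "Force India", "Renault", "Lotus", "Audi", "Cadillac",
-- ]
--
-- ENGINE_SUFFIXES = [
--     "Honda RBPT", "Mercedes", "Ferrari", "Renault", "Ford", "RBPT", "Aramco",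
--     "Peugeot", "BMW", "Cosworth",
-- ]
--
-- def clean_team(raw: str) -> str:
--     """Return the canonical short team name from a raw car/team string."""
--     raw = raw.strip()
--     for team in sorted(KNOWN_TEAMS, key=len, reverse=True):
--         if raw.startswith(team):
--             return team
--     for suffix in ENGINE_SUFFIXES:
--         if suffix in raw:
--             candidate = raw[: raw.index(suffix)].strip().rstrip(",- ")
--             if candidate:
--                 return candidate
--     return raw
-- ===== SOURCE B (Python) =====
-- KNOWN_TEAMS = [
--     "Red Bull Racing", "Aston Martin", "Haas F1 Team", "Kick Sauber",
--     "Racing Bulls", "McLaren", "Mercedes", "Ferrari", "Alpine", "Williams",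
--     "AlphaTauri", "Alpha Tauri", "Alfa Romeo", "Haas", "RB", "Sauber",
--     "Toro Rosso", "Force India", "Renault", "Lotus", "Audi", "Cadillac",
-- ]
--
-- ENGINE_SUFFIXES = [
--     "Honda RBPT", "Mercedes", "Ferrari", "Renault", "Ford", "RBPT", "Aramco",
--     "Peugeot", "BMW", "Cosworth",
-- ]
--
-- TEAM_SET = set(KNOWN_TEAMS)
-- MAX_TEAM_LEN = max(len(t) for t in KNOWN_TEAMS)
--
--
-- def _engine_cut(raw, suffixes):
--     """First engine suffix that splits raw with a non-empty cleaned head."""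
--     if not suffixes:
--         return raw
--     head, sep, _ = raw.partition(suffixes[0])
--     if sep:
--         candidate = head.strip().rstrip(",- ")
--         if candidate:
--             return candidate
--     return _engine_cut(raw, suffixes[1:])
--
--
-- def clean_team(raw: str) -> str:
--     """Return the canonical short team name from a raw car/team string."""
--     raw = raw.strip()
--     # instead of matching teams against raw, probe raw's own prefixes,
--     # longest useful length first, against a hash set of the teams
--     for i in range(min(len(raw), MAX_TEAM_LEN), 0, -1):
--         if raw[:i] in TEAM_SET:
--             return raw[:i]
--     return _engine_cut(raw, ENGINE_SUFFIXES)
-- ===== Notes on version B (the rewrite author's own statement) =====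
-- stated objective: alternative
-- what changed: A sorts KNOWN_TEAMS by length and scans the teams for the first prefix of raw; B inverts the traversal: it probes raw's own prefixes against a hash set of the teams, longest useful length first (capped by the maximum team-name length), and the engine-suffix fallback becomes a recursion using str.partition instead of in/index/slice.
import Mathlib
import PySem

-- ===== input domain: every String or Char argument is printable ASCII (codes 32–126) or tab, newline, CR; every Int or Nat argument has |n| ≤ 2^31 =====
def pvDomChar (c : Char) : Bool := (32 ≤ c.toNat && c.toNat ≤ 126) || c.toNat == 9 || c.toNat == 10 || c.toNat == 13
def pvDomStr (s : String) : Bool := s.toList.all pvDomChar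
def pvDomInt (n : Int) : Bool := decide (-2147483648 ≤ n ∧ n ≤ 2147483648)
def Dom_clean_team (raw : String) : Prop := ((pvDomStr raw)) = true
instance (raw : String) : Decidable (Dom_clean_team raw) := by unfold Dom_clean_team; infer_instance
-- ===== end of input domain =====

-- B inverts A's traversal: instead of sorting KNOWN_TEAMS and scanning for the first
-- prefix match, it probes raw's prefixes longest-first against a set of the teams;
-- objective: alternative (no sort, no scan over the team list).

-- Module constants shared by both Pythons
def KNOWN_TEAMS : List String :=
  ["Red Bull Racing", "Aston Martin", "Haas F1 Team", "Kick Sauber",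
   "Racing Bulls", "McLaren", "Mercedes", "Ferrari", "Alpine", "Williams",
   "AlphaTauri", "Alpha Tauri", "Alfa Romeo", "Haas", "RB", "Sauber",
   "Toro Rosso", "Force India", "Renault", "Lotus", "Audi", "Cadillac"]

def ENGINE_SUFFIXES : List String :=
  ["Honda RBPT", "Mercedes", "Ferrari", "Renault", "Ford", "RBPT", "Aramco",
   "Peugeot", "BMW", "Cosworth"]

-- hand port of Python's s.rstrip(",- ") (PySem has no rstrip-with-chars); exact:
-- drops trailing characters from the set {',', '-', ' '}
def pyRstripCommaDashSpace (s : String) : String :=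
  String.ofList ((s.toList.reverse.dropWhile (fun c => c == ',' || c == '-' || c == ' ')).reverse)

-- ===== PORT A =====
-- candidate = raw[: raw.index(suffix)].strip().rstrip(",- ")   (index guarded by `suffix in raw`,
-- so PySem.Str.find = Python's .index here)
def clean_team_fallbackA (raw : String) : List String → String
  | [] => raw
  | suffix :: rest =>
    if PySem.Str.isIn suffix raw then
      let candidate := pyRstripCommaDashSpace
        (PySem.Str.strip (PySem.Str.slice raw none (some (PySem.Str.find raw suffix))))
      if candidate ≠ "" then candidate else clean_team_fallbackA raw rest
    else clean_team_fallbackA raw rest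

def clean_team (raw : String) : String :=
  let raw := PySem.Str.strip raw
  match (PySem.List.sorted KNOWN_TEAMS (fun t => PySem.Str.len t) true).find?
      (fun team => PySem.Str.startswith raw team) with
  | some team => team
  | none => clean_team_fallbackA raw ENGINE_SUFFIXES

-- ===== PORT B =====
-- TEAM_SET = set(KNOWN_TEAMS)
def TEAM_SET : PySem.Set String := PySem.Set.ofList KNOWN_TEAMS

-- MAX_TEAM_LEN = max(len(t) for t in KNOWN_TEAMS); Python max raises only on an empty
-- iterable, never here (KNOWN_TEAMS is a non-empty literal), so getD 0 is exact; the
-- value is a length (nonnegative), so toNat loses nothing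
def MAX_TEAM_LEN : Nat :=
  ((PySem.List.max? (KNOWN_TEAMS.map (fun t => PySem.Str.len t)) (fun x => x)).getD 0).toNat

-- for i in range(min(len(raw), MAX_TEAM_LEN), 0, -1): if raw[:i] in TEAM_SET: return raw[:i]
def clean_team_prefixLoop (raw : String) : Nat → Option String
  | 0 => none
  | i + 1 =>
    let p := PySem.Str.slice raw none (some ((i + 1 : Nat) : Int))
    if PySem.Set.contains TEAM_SET p then some p else clean_team_prefixLoop raw i

-- hand port of Python's s.partition(sep) (not in PySem); exact: (head, sep, tail) at the
-- first occurrence, (s, "", "") when sep is absent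
def pyPartition (s sep : String) : String × String × String :=
  if PySem.Str.isIn sep s then
    (PySem.Str.slice s none (some (PySem.Str.find s sep)), sep,
     PySem.Str.slice s (some (PySem.Str.find s sep + (PySem.Str.len sep : Int))) none)
  else (s, "", "")

-- recursive _engine_cut(raw, suffixes)
def clean_team_engineCut (raw : String) : List String → String
  | [] => raw
  | s :: rest =>
    let p := pyPartition raw s
    if p.2.1 ≠ "" then
      let candidate := pyRstripCommaDashSpace (PySem.Str.strip p.1)
      if candidate ≠ "" then candidate else clean_team_engineCut raw rest
    else clean_team_engineCut raw rest

def clean_team_alt (raw : String) : String :=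
  let raw := PySem.Str.strip raw
  match clean_team_prefixLoop raw (min raw.toList.length MAX_TEAM_LEN) with
  | some t => t
  | none => clean_team_engineCut raw ENGINE_SUFFIXES

-- ===== PRECONDITION & SPEC =====
def Spec_clean_team (raw : String) (out : String) : Prop := out = clean_team_alt raw
instance (raw : String) (out : String) : Decidable (Spec_clean_team raw out) := by unfold Spec_clean_team; infer_instance

-- ===== CLAIM =====
def Claim_equal_clean_team : Prop := ∀ (raw : String), Dom_clean_team raw → Spec_clean_team raw (clean_team raw)

-- ===== LEMMAS AND PROOFS =====

-- raw[:i] for a Nat i, on the character list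
theorem takeP_toList (r : String) (i : Nat) :
    (PySem.Str.slice r none (some ((i : Nat) : Int))).toList = r.toList.take i := by
  simp [pysem]

-- the first satisfying element of a length-descending list has maximal length among matches
theorem find?_pairwise_max {L : List String} {p : String → Bool} {a : String}
    (hpw : L.Pairwise (fun u v => PySem.Str.len v ≤ PySem.Str.len u))
    (hfind : L.find? p = some a) :
    ∀ x ∈ L, p x → PySem.Str.len x ≤ PySem.Str.len a := by
  induction L with
  | nil => simp at hfind
  | cons h t ih =>
    rcases List.pairwise_cons.mp hpw with ⟨hh, ht⟩
    by_cases hp : p h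
    · rw [List.find?_cons_of_pos hp] at hfind
      cases hfind
      intro x hx _
      rcases List.mem_cons.mp hx with hx | hx
      · subst hx; exact le_refl _
      · exact hh x hx
    · rw [List.find?_cons_of_neg hp] at hfind
      intro x hx hpx
      rcases List.mem_cons.mp hx with hx | hx
      · exact absurd hpx (by simpa [hx] using hp)
      · exact ih ht hfind x hx hpx

-- a prefix t of r is exactly r[:len(t)]
theorem prefix_eq_take {r t : String} (h : PySem.Str.startswith r t = true) :
    r.toList.take t.toList.length = t.toList := by
  have ht : t.toList <+: r.toList := by
    have := PySem.Chars.startswith_iff (s := r.toList) (p := t.toList)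
    simp only [PySem.Str.startswith_eq] at h
    exact this.mp h
  exact (List.prefix_iff_eq_take.mp ht).symm

-- r[:i] is a prefix of r
theorem take_startswith (r : String) (i : Nat) :
    PySem.Str.startswith r (PySem.Str.slice r none (some ((i : Nat) : Int))) = true := by
  simp only [PySem.Str.startswith_eq]
  exact (PySem.Chars.startswith_iff _ _).mpr (by rw [takeP_toList]; exact List.take_prefix i r.toList)

theorem contains_team_iff (p : String) :
    PySem.Set.contains TEAM_SET p = true ↔ p ∈ KNOWN_TEAMS := by
  rw [PySem.Set.contains_iff TEAM_SET p]
  exact PySem.Set.mem_ofList KNOWN_TEAMS p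

-- loop returns none iff no positive-length prefix of r up to n is a team
theorem loop_none_iff (r : String) (n : Nat) :
    clean_team_prefixLoop r n = none ↔
    ∀ i, 0 < i → i ≤ n → PySem.Str.slice r none (some ((i : Nat) : Int)) ∉ KNOWN_TEAMS := by
  induction n with
  | zero => simp [clean_team_prefixLoop]; omega
  | succ m ih =>
    simp only [clean_team_prefixLoop]
    by_cases hc : PySem.Set.contains TEAM_SET (PySem.Str.slice r none (some ((m + 1 : Nat) : Int))) = true
    · rw [if_pos hc]
      simp only [reduceCtorEq, false_iff]
      intro hall
      exact hall (m + 1) (by omega) (le_refl _) ((contains_team_iff _).mp hc)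
    · rw [if_neg hc, ih]
      constructor
      · intro hall i hi him
        rcases Nat.lt_or_ge i (m + 1) with h | h
        · exact hall i hi (by omega)
        · have : i = m + 1 := by omega
          subst this
          exact fun hmem => hc ((contains_team_iff _).mpr hmem)
      · intro hall i hi him
        exact hall i hi (by omega)

-- loop returns some t: t = r[:i] is a team and no longer prefix up to n is a team
theorem loop_some_spec (r : String) (n : Nat) (t : String)
    (h : clean_team_prefixLoop r n = some t) :
    ∃ i, 0 < i ∧ i ≤ n ∧ t = PySem.Str.slice r none (some ((i : Nat) : Int)) ∧
      t ∈ KNOWN_TEAMS ∧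
      ∀ j, i < j → j ≤ n → PySem.Str.slice r none (some ((j : Nat) : Int)) ∉ KNOWN_TEAMS := by
  induction n with
  | zero => simp [clean_team_prefixLoop] at h
  | succ m ih =>
    simp only [clean_team_prefixLoop] at h
    by_cases hc : PySem.Set.contains TEAM_SET (PySem.Str.slice r none (some ((m + 1 : Nat) : Int))) = true
    · rw [if_pos hc] at h
      cases h
      exact ⟨m + 1, by omega, le_refl _, rfl, (contains_team_iff _).mp hc, by omega⟩
    · rw [if_neg hc] at h
      rcases ih h with ⟨i, hi, him, ht, hmem, hmax⟩
      refine ⟨i, hi, by omega, ht, hmem, ?_⟩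
      intro j hij hjm
      rcases Nat.lt_or_ge j (m + 1) with hlt | hge
      · exact hmax j hij (by omega)
      · have : j = m + 1 := by omega
        subst this
        exact fun hmem' => hc ((contains_team_iff _).mpr hmem')

-- every known team is non-empty
theorem teams_nonempty : ∀ t ∈ KNOWN_TEAMS, t.toList.length ≠ 0 := by decide

-- no known team is longer than MAX_TEAM_LEN
theorem teams_len_le : ∀ t ∈ KNOWN_TEAMS, t.toList.length ≤ MAX_TEAM_LEN := by decide

-- every engine suffix is non-empty
theorem suffixes_nonempty : ∀ s ∈ ENGINE_SUFFIXES, s ≠ "" := by decide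

-- A's in/index/slice loop = B's partition recursion (on non-empty suffixes)
theorem fallback_eq (r : String) (l : List String) (hne : ∀ s ∈ l, s ≠ "") :
    clean_team_fallbackA r l = clean_team_engineCut r l := by
  induction l with
  | nil => rfl
  | cons s rest ih =>
    have ihr := ih (fun x hx => hne x (List.mem_cons_of_mem s hx))
    have hs := hne s (List.mem_cons_self)
    simp only [clean_team_fallbackA, clean_team_engineCut, pyPartition]
    by_cases hin : PySem.Str.isIn s r = true
    · simp only [if_pos hin]
      split_ifs <;> simp_all
    · simp only [if_neg hin]
      split_ifs <;> simp_all

-- main part: first prefix match of the length-descending sort = longest-first prefix probe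
theorem main_eq (r : String) :
    (PySem.List.sorted KNOWN_TEAMS (fun t => PySem.Str.len t) true).find?
      (fun team => PySem.Str.startswith r team)
    = clean_team_prefixLoop r (min r.toList.length MAX_TEAM_LEN) := by
  set p : String → Bool := fun t => PySem.Str.startswith r t with hp
  set n := min r.toList.length MAX_TEAM_LEN with hn
  cases hA : (PySem.List.sorted KNOWN_TEAMS (fun t => PySem.Str.len t) true).find? p with
  | none =>
    have hnone : ∀ x ∈ KNOWN_TEAMS, ¬ p x := by
      intro x hx
      have := List.find?_eq_none.mp hA x ((PySem.List.mem_sorted _ _ _ _).mpr hx)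
      simpa using this
    symm
    rw [loop_none_iff]
    intro i _ _ hmem
    exact hnone _ hmem (take_startswith r i)
  | some a =>
    have haP : p a = true := List.find?_some hA
    have haMem : a ∈ KNOWN_TEAMS := (PySem.List.mem_sorted _ _ _ _).mp (List.mem_of_find?_eq_some hA)
    have haMax : ∀ x ∈ KNOWN_TEAMS, p x → PySem.Str.len x ≤ PySem.Str.len a := by
      intro x hx hpx
      exact find?_pairwise_max (PySem.List.sorted_pairwise_rev _ _) hA x
        ((PySem.List.mem_sorted _ _ _ _).mpr hx) hpx
    set la := a.toList.length with hla
    have hla_pos : 0 < la := Nat.pos_of_ne_zero (teams_nonempty a haMem)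
    have hla_le : la ≤ n := by
      have hpre : a.toList <+: r.toList := by
        have := PySem.Chars.startswith_iff (s := r.toList) (p := a.toList)
        simp only [hp, PySem.Str.startswith_eq] at haP
        exact this.mp haP
      rw [hn]
      exact le_min hpre.length_le (teams_len_le a haMem)
    have htake_a : PySem.Str.slice r none (some ((la : Nat) : Int)) = a := by
      apply String.toList_inj.mp
      rw [takeP_toList]
      exact prefix_eq_take haP
    cases hB : clean_team_prefixLoop r n with
    | none =>
      exact absurd (htake_a ▸ haMem) ((loop_none_iff r n).mp hB la hla_pos hla_le)
    | some t =>
      rcases loop_some_spec r n t hB with ⟨i, hi, him, ht, hmem, hmax⟩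
      -- t is r[:i], a prefix team, so len t ≤ len a; len t = i since i ≤ n
      have htP : p t = true := ht ▸ take_startswith r i
      have hlen_t : t.toList.length = i := by
        rw [ht, takeP_toList, List.length_take]
        omega
      have h1 : i ≤ la := by
        have := haMax t hmem htP
        simp only [PySem.Str.len_eq] at this
        omega
      have h2 : ¬ i < la := by
        intro hlt
        exact hmax la hlt hla_le (htake_a ▸ haMem)
      have : i = la := by omega
      rw [ht, this, htake_a]

-- ===== VERDICT (by name: the statement is the Claim_ definition above) =====
theorem clean_team_spec : Claim_equal_clean_team := by
  intro raw _
  show clean_team raw = clean_team_alt raw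
  simp only [clean_team, clean_team_alt]
  rw [main_eq]
  cases clean_team_prefixLoop (PySem.Str.strip raw) (min (PySem.Str.strip raw).toList.length MAX_TEAM_LEN) with
  | none => exact fallback_eq _ _ suffixes_nonempty
  | some t => rfl
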